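-- pv_equiv track=rewrite | github.com/binarybottle/optimize_layouts | layouts_plot.py | convert_items_positions_to_qwerty_layout
-- ===== SOURCE A (Python) =====
-- def convert_items_positions_to_qwerty_layout(items, positions):
--     """
--     Convert items->positions mapping to QWERTY-ordered layout string.
--
--     Args:
--         items: Letters in assignment order (e.g., "etaoinsrhldcum")
--         positions: QWERTY positions where those letters go (e.g., "KJ;ASDVRLFUEIM")
--
--     Returns:
--         Layout string in QWERTY key order (e.g., "  cr  du  oinl  teha   s  m     ")
--     """
--     QWERTY_ORDER = "QWERTYUIOPASDFGHJKL;ZXCVBNM,./['"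
--
--     # Create mapping from position to letter
--     pos_to_letter = dict(zip(positions, items))
--
--     # Build layout string in QWERTY order
--     layout_chars = []
--     for qwerty_pos in QWERTY_ORDER:
--         if qwerty_pos in pos_to_letter:
--             layout_chars.append(pos_to_letter[qwerty_pos])
--         else:
--             layout_chars.append(' ')  # Use space for unassigned positions
--
--     return ''.join(layout_chars)
-- ===== SOURCE B (Python) =====
-- def convert_items_positions_to_qwerty_layout(items, positions):
--     """Scatter letters directly into a QWERTY-indexed array instead of
--     building a dict and scanning QWERTY_ORDER with membership tests."""
--     QWERTY_ORDER = "QWERTYUIOPASDFGHJKL;ZXCVBNM,./['"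
--     layout = [' '] * len(QWERTY_ORDER)
--     for pos, letter in zip(positions, items):
--         i = QWERTY_ORDER.find(pos)
--         if i >= 0:
--             layout[i] = letter
--     return ''.join(layout)
-- ===== Notes on version B (the rewrite author's own statement) =====
-- stated objective: alternative
-- what changed: Instead of building a position->letter dict and then scanning QWERTY_ORDER with membership tests, B preallocates a 32-char space array and scatters each (position, letter) assignment into it at QWERTY_ORDER.find(position), skipping unknown positions and letting later duplicates overwrite earlier ones.
import Mathlib
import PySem

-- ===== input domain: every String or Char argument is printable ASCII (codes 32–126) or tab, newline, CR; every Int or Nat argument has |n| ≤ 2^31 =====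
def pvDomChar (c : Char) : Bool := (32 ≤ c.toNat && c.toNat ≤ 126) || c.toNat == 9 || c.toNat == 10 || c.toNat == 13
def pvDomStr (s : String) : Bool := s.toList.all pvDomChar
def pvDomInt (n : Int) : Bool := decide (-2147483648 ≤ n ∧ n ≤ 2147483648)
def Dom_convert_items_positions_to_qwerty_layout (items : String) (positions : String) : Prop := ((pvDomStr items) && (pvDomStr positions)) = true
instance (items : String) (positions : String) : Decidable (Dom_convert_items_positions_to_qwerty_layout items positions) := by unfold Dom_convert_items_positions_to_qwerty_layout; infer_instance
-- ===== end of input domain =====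

-- B scatters each (position, letter) assignment directly into a QWERTY-indexed array
-- instead of building a position→letter dict and scanning QWERTY_ORDER with membership
-- tests (objective: alternative decomposition; same cost).


-- ===== PORT A =====
def pvQwertyOrder : List Char := "QWERTYUIOPASDFGHJKL;ZXCVBNM,./['".toList

def convert_items_positions_to_qwerty_layout (items : String) (positions : String) : String :=
  -- pos_to_letter = dict(zip(positions, items))
  let pos_to_letter : PySem.Dict Char Char :=
    PySem.Dict.ofList (positions.toList.zip items.toList)
  -- for qwerty_pos in QWERTY_ORDER: append letter or ' '
  let layout_chars : List Char :=
    pvQwertyOrder.foldl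
      (fun acc q =>
        if pos_to_letter.contains q then
          acc ++ [(pos_to_letter.get? q).getD ' ']   -- guarded lookup: exact, key is present
        else
          acc ++ [' '])
      []
  String.ofList layout_chars

-- ===== PORT B =====
def convert_items_positions_to_qwerty_layout_alt (items : String) (positions : String) : String :=
  -- layout = [' '] * len(QWERTY_ORDER); scatter assignments, last wins
  let layout : List Char :=
    (positions.toList.zip items.toList).foldl
      (fun arr pl =>
        let i := PySem.Chars.find pvQwertyOrder [pl.1]
        if 0 ≤ i then PySem.List.pySetD arr i pl.2 else arr)
      (List.replicate pvQwertyOrder.length ' ')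
  String.ofList layout

-- ===== PRECONDITION & SPEC =====
def Spec_convert_items_positions_to_qwerty_layout (items : String) (positions : String) (out : String) : Prop := out = convert_items_positions_to_qwerty_layout_alt items positions
instance (items : String) (positions : String) (out : String) : Decidable (Spec_convert_items_positions_to_qwerty_layout items positions out) := by unfold Spec_convert_items_positions_to_qwerty_layout; infer_instance

-- ===== CLAIM (what is proved, stated in full; the proofs are below) =====
def Claim_equal_convert_items_positions_to_qwerty_layout : Prop := ∀ (items : String) (positions : String), Dom_convert_items_positions_to_qwerty_layout items positions → Spec_convert_items_positions_to_qwerty_layout items positions (convert_items_positions_to_qwerty_layout items positions)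

-- ===== LEMMAS AND PROOFS =====

/-- The gathered layout: QWERTY_ORDER mapped through lookup-or-space. -/
def pvGather (d : PySem.Dict Char Char) : List Char :=
  pvQwertyOrder.map (fun q => (d.get? q).getD ' ')

lemma pvGatherA (d : PySem.Dict Char Char) :
    pvQwertyOrder.foldl
      (fun acc q => if d.contains q then acc ++ [(d.get? q).getD ' '] else acc ++ [' ']) []
      = pvGather d := by
  have hfn : (fun acc q => if d.contains q then acc ++ [(d.get? q).getD ' '] else acc ++ [' '])
      = fun (acc : List Char) q => acc ++ [(d.get? q).getD ' '] := by
    funext acc q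
    by_cases h : d.contains q = true
    · simp [h]
    · have hb : d.contains q = false := by simpa using h
      have : d.get? q = none := by
        have := PySem.Dict.contains_eq_isSome_get? d q
        rw [hb] at this
        exact Option.not_isSome_iff_eq_none.mp (by simp [← this])
      simp [hb, this]
  rw [hfn, PySem.List.foldl_append_singleton_eq_map]
  rfl

lemma pvQwertyNodup : pvQwertyOrder.Nodup := by decide

/-- One scatter step matches one dict insert. -/
lemma pvStep (d : PySem.Dict Char Char) (p l : Char) :
    (if 0 ≤ PySem.Chars.find pvQwertyOrder [p]
     then PySem.List.pySetD (pvGather d) (PySem.Chars.find pvQwertyOrder [p]) l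
     else pvGather d) = pvGather (d.insert p l) := by
  by_cases hf : 0 ≤ PySem.Chars.find pvQwertyOrder [p]
  · rw [if_pos hf]
    obtain ⟨hpre, -⟩ := PySem.Chars.find_spec (s := pvQwertyOrder) (sub := [p]) hf
    set i := (PySem.Chars.find pvQwertyOrder [p]).toNat with hidef
    obtain ⟨t, ht⟩ := hpre
    have hi : i < pvQwertyOrder.length := by
      by_contra hge
      rw [List.drop_eq_nil_of_le (by omega)] at ht
      simp at ht
    have hqi : pvQwertyOrder[i] = p := by
      have := congrArg List.head? ht
      rw [List.head?_drop] at this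
      simp only [List.cons_append, List.head?_cons] at this
      have h2 : pvQwertyOrder[i]? = some pvQwertyOrder[i] := List.getElem?_eq_getElem hi
      rw [h2] at this
      exact (Option.some.inj this).symm
    rw [PySem.List.pySetD_of_nonneg _ l hf]
    apply List.ext_getElem
    · simp [pvGather]
    · intro j hj hj'
      have hjlt : j < pvQwertyOrder.length := by simpa [pvGather] using hj
      rw [List.getElem_set]
      simp only [pvGather, List.getElem_map]
      by_cases hij : i = j
      · subst hij
        rw [if_pos rfl, hqi, PySem.Dict.get?_insert_self]
        rfl
      · rw [if_neg hij]
        have hne : pvQwertyOrder[j] ≠ p := by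
          rw [← hqi]
          intro hEq
          exact hij ((List.Nodup.getElem_inj_iff pvQwertyNodup).mp hEq.symm)
        rw [PySem.Dict.get?_insert_of_ne d l hne]
  · rw [if_neg hf]
    have hneg : PySem.Chars.find pvQwertyOrder [p] = -1 := by
      have := PySem.Chars.neg_one_le_find (s := pvQwertyOrder) (sub := [p])
      omega
    have hnin : p ∉ pvQwertyOrder := by
      intro hmem
      have hinf : [p] <:+: pvQwertyOrder := by
        obtain ⟨l1, l2, h12⟩ := List.append_of_mem hmem
        exact ⟨l1, l2, by simp [h12]⟩
      exact (PySem.Chars.find_eq_neg_one_iff _ _).mp hneg hinf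
    unfold pvGather
    apply List.map_congr_left
    intro q hq
    have : q ≠ p := fun hEq => hnin (hEq ▸ hq)
    rw [PySem.Dict.get?_insert_of_ne d l this]

/-- Scatter loop invariant: the array always equals the gather of the dict built so far. -/
lemma pvScatterInv (zs : List (Char × Char)) (d : PySem.Dict Char Char) (arr : List Char)
    (h : arr = pvGather d) :
    zs.foldl
      (fun arr pl =>
        if 0 ≤ PySem.Chars.find pvQwertyOrder [pl.1]
        then PySem.List.pySetD arr (PySem.Chars.find pvQwertyOrder [pl.1]) pl.2 else arr)
      arr
    = pvGather (zs.foldl (fun d pl => d.insert pl.1 pl.2) d) := by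
  induction zs generalizing d arr with
  | nil => simpa using h
  | cons pl zs ih =>
    simp only [List.foldl_cons]
    exact ih _ _ (by rw [h, pvStep])

lemma pvOfList_eq_foldl (l : List (Char × Char)) :
    PySem.Dict.ofList l = l.foldl (fun d pl => d.insert pl.1 pl.2) PySem.Dict.empty := rfl

-- ===== VERDICT (by name: the statement is the Claim_ definition above) =====
theorem convert_items_positions_to_qwerty_layout_spec : Claim_equal_convert_items_positions_to_qwerty_layout := by
  intro items positions _
  unfold Spec_convert_items_positions_to_qwerty_layout
  unfold convert_items_positions_to_qwerty_layout convert_items_positions_to_qwerty_layout_alt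
  simp only
  rw [pvGatherA, pvOfList_eq_foldl,
      pvScatterInv _ PySem.Dict.empty _ (by decide)]
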